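-- pv_equiv track=rewrite | github.com/chinese-liliths-throne/GirlLifeLocalization | src/qsrc_runtime_checker.py | _build_code_mask
-- ===== SOURCE A (Python) =====
-- def _build_code_mask(line: str) -> list[bool]:
--     mask = [True] * len(line)
--     quote: str | None = None
--     index = 0
--     while index < len(line):
--         char = line[index]
--         next_char = line[index + 1] if index + 1 < len(line) else ""
--
--         if quote:
--             mask[index] = False
--             if char == quote:
--                 if next_char == quote:
--                     mask[index + 1] = False
--                     index += 2
--                     continue
--                 quote = None
--             index += 1
--             continue
--
--         if char == "!" and next_char == "!":
--             for pos in range(index, len(line)):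
--                 mask[pos] = False
--             break
--
--         if char in ("'", '"'):
--             mask[index] = False
--             quote = char
--             index += 1
--             continue
--
--         index += 1
--     return mask
-- ===== SOURCE B (Python) =====
-- def _string_end(line: str, q: str, j: int) -> int:
--     """Return the index just past the string literal opened by q, scanning from j."""
--     n = len(line)
--     while j < n:
--         if line[j] == q:
--             if line[j + 1:j + 2] == q:
--                 j += 2
--             else:
--                 return j + 1
--         else:
--             j += 1
--     return j
--
--
-- def _build_code_mask(line: str) -> list[bool]:
--     mask: list[bool] = []
--     n = len(line)
--     i = 0
--     while i < n:
--         c = line[i]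
--         if c == "'" or c == '"':
--             j = _string_end(line, c, i + 1)
--             mask.extend([False] * (j - i))
--             i = j
--         elif c == "!" and line[i + 1:i + 2] == "!":
--             mask.extend([False] * (n - i))
--             break
--         else:
--             mask.append(True)
--             i += 1
--     return mask
-- ===== Notes on version B (the rewrite author's own statement) =====
-- stated objective: alternative
-- what changed: Replaced A's per-character state machine (quote flag, preallocated mask mutated index by index) with a token-at-a-time scanner: a helper consumes each whole string literal and the mask is built by appending runs of False/True in bulk.
import Mathlib
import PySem

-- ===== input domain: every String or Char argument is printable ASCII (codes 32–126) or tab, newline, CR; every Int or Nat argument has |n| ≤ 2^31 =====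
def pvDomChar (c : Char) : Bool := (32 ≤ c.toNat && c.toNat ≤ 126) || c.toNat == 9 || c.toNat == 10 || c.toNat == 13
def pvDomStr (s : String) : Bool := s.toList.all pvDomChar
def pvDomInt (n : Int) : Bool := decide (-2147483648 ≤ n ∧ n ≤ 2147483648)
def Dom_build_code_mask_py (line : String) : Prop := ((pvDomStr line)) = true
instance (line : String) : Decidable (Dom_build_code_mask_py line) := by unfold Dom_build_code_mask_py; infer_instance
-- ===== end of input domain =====

-- B replaces A's per-character state machine over a preallocated mutable mask by a token-at-a-time
-- scanner (whole string literal consumed by a helper, mask built by appending runs); objective: alternative.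

-- ===== PORT A =====
-- A's while-loop: state (mask, quote, index); mask is updated in place (List.set).
def aLoop (ln : List Char) (mask : List Bool) (quote : Option Char) (index : Nat) : List Bool :=
  if h : index < ln.length then
    let char := ln[index]
    let next_char : Option Char := ln[index + 1]?   -- Python's "" sentinel ↔ none
    match quote with
    | some q =>
      if char = q then
        if next_char = some q then
          aLoop ln ((mask.set index false).set (index + 1) false) (some q) (index + 2)
        else
          aLoop ln (mask.set index false) none (index + 1)
      else
        aLoop ln (mask.set index false) (some q) (index + 1)
    | none =>
      if char = '!' ∧ next_char = some '!' then
        -- for pos in range(index, len(ln)): mask[pos] = False; break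
        (PySem.List.pyRange (index : Int) (ln.length : Int) 1).foldl
          (fun m p => m.set p.toNat false) mask
      else if char = '\'' ∨ char = '"' then
        aLoop ln (mask.set index false) (some char) (index + 1)
      else
        aLoop ln mask none (index + 1)
  else mask
termination_by ln.length - index

def build_code_mask_py (line : String) : List Bool :=
  aLoop line.toList (List.replicate line.toList.length true) none 0

-- ===== PORT B =====
-- B's _string_end: index just past the string literal opened by q, scanning from j.
def bStringEnd (ln : List Char) (q : Char) (j : Nat) : Nat :=
  if h : j < ln.length then
    if ln[j] = q then
      if ln[j + 1]? = some q then   -- ln[j+1:j+2] == q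
        bStringEnd ln q (j + 2)
      else j + 1
    else bStringEnd ln q (j + 1)
  else j
termination_by ln.length - j

-- needed by bLoop's termination: _string_end never moves backwards
theorem le_bStringEnd (ln : List Char) (q : Char) : ∀ j, j ≤ bStringEnd ln q j := by
  intro j
  fun_induction bStringEnd ln q j with
  | case1 j h hq hq2 ih => omega
  | case2 j h hq hq2 => omega
  | case3 j h hq ih => omega
  | case4 j h => omega

-- B's main loop: consume one token at a time, appending a run to the mask.
def bLoop (ln : List Char) (mask : List Bool) (i : Nat) : List Bool :=
  if h : i < ln.length then
    let c := ln[i]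
    if c = '\'' ∨ c = '"' then
      let j := bStringEnd ln c (i + 1)
      bLoop ln (mask ++ List.replicate (j - i) false) j
    else if c = '!' ∧ ln[i + 1]? = some '!' then
      mask ++ List.replicate (ln.length - i) false
    else
      bLoop ln (mask ++ [true]) (i + 1)
  else mask
termination_by ln.length - i
decreasing_by
  · have := le_bStringEnd ln ln[i] (i + 1); omega
  · omega

def build_code_mask_py_alt (line : String) : List Bool :=
  bLoop line.toList [] 0

-- ===== PRECONDITION & SPEC =====
def Spec_build_code_mask_py (line : String) (out : List Bool) : Prop := out = build_code_mask_py_alt line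
instance (line : String) (out : List Bool) : Decidable (Spec_build_code_mask_py line out) := by unfold Spec_build_code_mask_py; infer_instance

-- ===== CLAIM (what is proved, stated in full; the proofs are below) =====
def Claim_equal_build_code_mask_py : Prop := ∀ (line : String), Dom_build_code_mask_py line → Spec_build_code_mask_py line (build_code_mask_py line)

-- ===== LEMMAS AND PROOFS =====

theorem bLoop_acc (ln : List Char) :
    ∀ k i (acc : List Bool), ln.length - i ≤ k →
      bLoop ln acc i = acc ++ bLoop ln [] i := by
  intro k
  induction k with
  | zero =>
    intro i acc h
    have hi : ¬ i < ln.length := by omega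
    conv_lhs => rw [bLoop]
    conv_rhs => rw [bLoop]
    simp [hi]
  | succ k ih =>
    intro i acc h
    by_cases hi : i < ln.length
    · conv_lhs => rw [bLoop]
      conv_rhs => rw [bLoop]
      simp only [hi, dif_pos]
      have hj := le_bStringEnd ln (ln[i]'hi) (i + 1)
      split
      · have hk : ln.length - bStringEnd ln (ln[i]'hi) (i + 1) ≤ k := by omega
        rw [ih _ _ hk]
        simp
        exact (ih _ _ hk).symm
      · split
        · simp
        · have hk : ln.length - (i + 1) ≤ k := by omega
          rw [ih _ _ hk]
          simp
          simpa using (ih (i + 1) [true] hk).symm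
    · conv_lhs => rw [bLoop]
      conv_rhs => rw [bLoop]
      simp [hi]

theorem take_set_succ (l : List Bool) (j : Nat) (a : Bool) (h : j < l.length) :
    (l.set j a).take (j + 1) = l.take j ++ [a] := by
  rw [List.take_add_one]
  simp [List.take_set, h]
  exact List.set_eq_of_length_le (by simp)

-- the !!-comment fill: setting every position from i on to false
theorem range_fill (ln : List Char) :
    ∀ k i (mask : List Bool), ln.length - i ≤ k → mask.length = ln.length → i ≤ ln.length →
      (PySem.List.pyRange (i : Int) (ln.length : Int) 1).foldl (fun m p => m.set p.toNat false) mask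
        = mask.take i ++ List.replicate (ln.length - i) false := by
  intro k
  induction k with
  | zero =>
    intro i mask h hlen hle
    have hil : i = ln.length := by omega
    subst hil
    rw [PySem.List.pyRange_one_eq_nil (by omega)]
    simp [← hlen]
  | succ k ih =>
    intro i mask h hlen hle
    by_cases hi : i < ln.length
    · rw [PySem.List.pyRange_one_cons (by exact_mod_cast hi)]
      simp only [List.foldl_cons, Int.toNat_natCast]
      have hcast : ((i : Int) + 1) = ((i + 1 : Nat) : Int) := by push_cast; ring
      rw [hcast, ih (i + 1) (mask.set i false) (by omega) (by simp [hlen]) (by omega)]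
      rw [take_set_succ mask i false (by omega)]
      have hrep : ln.length - i = (ln.length - (i + 1)) + 1 := by omega
      rw [hrep, List.replicate_succ]
      simp
    · have hil : i = ln.length := by omega
      subst hil
      rw [PySem.List.pyRange_one_eq_nil (by omega)]
      simp [← hlen]

theorem bLoop_stop (ln : List Char) (acc : List Bool) (i : Nat) (hi : ¬ i < ln.length) :
    bLoop ln acc i = acc := by
  rw [bLoop]; simp [hi]

theorem bStringEnd_stop (ln : List Char) (q : Char) (j : Nat) (hj : ¬ j < ln.length) :
    bStringEnd ln q j = j := by
  rw [bStringEnd]; simp [hj]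

theorem getD_set_away (mask : List Bool) (j m : Nat) (a d : Bool) (hm : j ≠ m) :
    (mask.set j a).getD m d = mask.getD m d := by
  simp [List.getD_eq_getElem?_getD, List.getElem?_set_ne hm]

theorem take_getD_succ (mask : List Bool) (i : Nat) (hi : i < mask.length) :
    mask.take (i + 1) = mask.take i ++ [mask.getD i false] := by
  rw [List.take_add_one]
  simp [List.getD_eq_getElem?_getD, List.getElem?_eq_getElem hi]

theorem main_inv (ln : List Char) :
    ∀ k i (mask : List Bool), ln.length - i ≤ k → mask.length = ln.length →
      (∀ m, i ≤ m → m < ln.length → mask.getD m false = true) →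
      (aLoop ln mask none i = mask.take i ++ bLoop ln [] i) ∧
      (∀ q, aLoop ln mask (some q) i =
        mask.take i ++ List.replicate (bStringEnd ln q i - i) false ++ bLoop ln [] (bStringEnd ln q i)) := by
  intro k
  induction k with
  | zero =>
    intro i mask h hlen htrue
    have hi : ¬ i < ln.length := by omega
    have htake : mask.take i = mask := List.take_of_length_le (by omega)
    constructor
    · rw [aLoop, bLoop_stop ln [] i hi]
      simp [hi, htake]
    · intro q
      rw [aLoop, bStringEnd_stop ln q i hi, bLoop_stop ln [] i hi]
      simp [hi, htake]
  | succ k ih =>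
    intro i mask h hlen htrue
    by_cases hi : i < ln.length
    · constructor
      · -- quote = None
        conv_lhs => rw [aLoop]
        simp only [hi, dif_pos]
        conv_rhs => rw [bLoop]
        simp only [hi, dif_pos]
        by_cases hq : ln[i] = '\'' ∨ ln[i] = '"'
        · have hbang : ¬(ln[i] = '!' ∧ ln[i + 1]? = some '!') := by
            rcases hq with hq | hq <;> simp [hq]
          rw [if_neg hbang, if_pos hq]
          have hj := le_bStringEnd ln (ln[i]'hi) (i + 1)
          have h2 := (ih (i + 1) (mask.set i false) (by omega) (by simp [hlen])
            (by intro m h1 h2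
                rw [getD_set_away mask i m false false (by omega)]
                exact htrue m (by omega) h2)).2 (ln[i]'hi)
          rw [h2, take_set_succ mask i false (by omega),
              bLoop_acc ln ln.length (bStringEnd ln (ln[i]'hi) (i + 1))
                ([] ++ List.replicate (bStringEnd ln (ln[i]'hi) (i + 1) - i) false) (by omega)]
          have hrep : bStringEnd ln (ln[i]'hi) (i + 1) - i
              = (bStringEnd ln (ln[i]'hi) (i + 1) - (i + 1)) + 1 := by omega
          rw [hrep, List.replicate_succ]
          rcases hq with hq | hq <;> simp [hq]
        · by_cases hbang : ln[i] = '!' ∧ ln[i + 1]? = some '!'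
          · rw [if_pos hbang, if_neg hq,
                range_fill ln ln.length i mask (by omega) hlen (by omega)]
            simp [hbang.1, hbang.2]
          · rw [if_neg hbang, if_neg hq,
                (ih (i + 1) mask (by omega) hlen
                  (by intro m h1 h2; exact htrue m (by omega) h2)).1,
                bLoop_acc ln ln.length (i + 1) ([] ++ [true]) (by omega),
                take_getD_succ mask i (by omega), htrue i (by omega) hi]
            simp [hq, hbang]
      · -- quote = Some q
        intro q
        conv_lhs => rw [aLoop]
        conv_rhs => rw [bStringEnd]
        simp only [hi, dif_pos]
        by_cases hc : ln[i] = q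
        · by_cases hn : ln[i + 1]? = some q
          · have hi1 : i + 1 < ln.length := (List.getElem?_eq_some_iff.mp hn).1
            have hj := le_bStringEnd ln q (i + 2)
            have h2 := (ih (i + 2) ((mask.set i false).set (i + 1) false) (by omega)
              (by simp [hlen])
              (by intro m h1m h2m
                  rw [getD_set_away _ (i + 1) m false false (by omega),
                      getD_set_away mask i m false false (by omega)]
                  exact htrue m (by omega) h2m)).2 q
            rw [h2, take_set_succ _ (i + 1) false (by simp; omega),
                take_set_succ mask i false (by omega)]
            have hrep : bStringEnd ln q (i + 2) - i
                = ((bStringEnd ln q (i + 2) - (i + 2)) + 1) + 1 := by omega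
            simp [hc, hn, hrep, List.replicate_succ]
          · have h1 := (ih (i + 1) (mask.set i false) (by omega) (by simp [hlen])
              (by intro m hm1 hm2
                  rw [getD_set_away mask i m false false (by omega)]
                  exact htrue m (by omega) hm2)).1
            rw [h1, take_set_succ mask i false (by omega)]
            simp [hc, hn]
        · have hj := le_bStringEnd ln q (i + 1)
          have h2 := (ih (i + 1) (mask.set i false) (by omega) (by simp [hlen])
            (by intro m hm1 hm2
                rw [getD_set_away mask i m false false (by omega)]
                exact htrue m (by omega) hm2)).2 q
          rw [h2, take_set_succ mask i false (by omega)]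
          have hrep : bStringEnd ln q (i + 1) - i
              = (bStringEnd ln q (i + 1) - (i + 1)) + 1 := by omega
          simp [hc, hrep, List.replicate_succ]
    · have htake : mask.take i = mask := List.take_of_length_le (by omega)
      constructor
      · rw [aLoop, bLoop_stop ln [] i hi]
        simp [hi, htake]
      · intro q
        rw [aLoop, bStringEnd_stop ln q i hi, bLoop_stop ln [] i hi]
        simp [hi, htake]

-- ===== VERDICT (by name: the statement is the Claim_ definition above) =====
theorem build_code_mask_py_spec : Claim_equal_build_code_mask_py := by
  intro line _
  unfold Spec_build_code_mask_py build_code_mask_py build_code_mask_py_alt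
  have h := (main_inv line.toList line.toList.length 0 (List.replicate line.toList.length true)
    (by omega) (by simp) (by intro m _ h2; rw [List.getD_eq_getElem?_getD, List.getElem?_replicate]; simp only [if_pos h2, Option.getD_some])).1
  simpa using h
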